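-- pv_equiv track=rewrite | github.com/memo1164/memoChat | main_server.py | message_to_data
-- ===== SOURCE A (Python) =====
-- def message_to_data(message_str):
--     # &(用户) #(文本)
--     username = ""
--     message = ""
--     data_type = 0
--
--     for i in message_str:
--         if data_type == 0 and i == '&':
--             data_type = 1
--             continue
--         if data_type == 1 and i == '#':
--             data_type = 2
--             continue
--         if data_type == 1:
--             username = username + i
--             continue
--         if data_type == 2:
--             message = message + i
--
--     return [username, message]
-- ===== SOURCE B (Python) =====
-- def message_to_data(message_str):
--     amp = message_str.find('&')
--     if amp == -1:
--         return ["", ""]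
--     rest = message_str[amp + 1:]
--     h = rest.find('#')
--     if h == -1:
--         return [rest, ""]
--     return [rest[:h], rest[h + 1:]]
-- ===== Notes on version B (the rewrite author's own statement) =====
-- stated objective: faster
-- what changed: Replaced the char-by-char three-state accumulator loop with two delimiter searches via str.find plus slicing of the remainder.
import Mathlib
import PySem

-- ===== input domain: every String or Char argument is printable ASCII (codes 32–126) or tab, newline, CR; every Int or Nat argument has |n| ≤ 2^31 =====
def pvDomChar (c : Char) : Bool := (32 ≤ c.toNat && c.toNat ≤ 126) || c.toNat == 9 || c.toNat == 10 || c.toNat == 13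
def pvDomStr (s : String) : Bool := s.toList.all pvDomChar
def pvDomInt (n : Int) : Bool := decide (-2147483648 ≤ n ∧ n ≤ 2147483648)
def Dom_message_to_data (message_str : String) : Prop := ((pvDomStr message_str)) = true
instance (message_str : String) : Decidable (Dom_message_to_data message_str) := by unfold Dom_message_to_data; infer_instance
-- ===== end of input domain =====

-- B replaces A's char-by-char three-state loop with two str.find calls and slicing (faster by a constant factor, measured).

-- ===== PORT A =====
-- state machine: data_type 0 = before '&', 1 = reading username, 2 = reading message
def mtdLoop : List Char → List Char → List Char → Nat → List Char × List Char
  | [], u, m, _ => (u, m)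
  | c :: cs, u, m, dt =>
    if dt = 0 ∧ c = '&' then mtdLoop cs u m 1
    else if dt = 1 ∧ c = '#' then mtdLoop cs u m 2
    else if dt = 1 then mtdLoop cs (u ++ [c]) m dt
    else if dt = 2 then mtdLoop cs u (m ++ [c]) dt
    else mtdLoop cs u m dt

def message_to_data (message_str : String) : List String :=
  let r := mtdLoop message_str.toList [] [] 0
  [String.ofList r.1, String.ofList r.2]

-- ===== PORT B =====
def message_to_data_alt (message_str : String) : List String :=
  let amp := PySem.Str.find message_str "&"
  if amp = -1 then ["", ""]
  else
    let rest := PySem.Str.slice message_str (some (amp + 1)) none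
    let h := PySem.Str.find rest "#"
    if h = -1 then [rest, ""]
    else [PySem.Str.slice rest none (some h), PySem.Str.slice rest (some (h + 1)) none]

-- ===== PRECONDITION & SPEC =====
def Spec_message_to_data (message_str : String) (out : List String) : Prop := out = message_to_data_alt message_str
instance (message_str : String) (out : List String) : Decidable (Spec_message_to_data message_str out) := by unfold Spec_message_to_data; infer_instance

-- ===== CLAIM (what is proved, stated in full; the proofs are below) =====
def Claim_equal_message_to_data : Prop := ∀ (message_str : String), Dom_message_to_data message_str → Spec_message_to_data message_str (message_to_data message_str)

-- ===== LEMMAS AND PROOFS =====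

theorem mtdLoop_state2 (cs u m : List Char) : mtdLoop cs u m 2 = (u, m ++ cs) := by
  induction cs generalizing m with
  | nil => simp [mtdLoop]
  | cons c cs ih => simp [mtdLoop, ih]

theorem mtdLoop_state1 (cs u m : List Char) :
    mtdLoop cs u m 1 =
      (u ++ cs.takeWhile (fun x => decide (x ≠ '#')),
       m ++ (cs.dropWhile (fun x => decide (x ≠ '#'))).drop 1) := by
  induction cs generalizing u with
  | nil => simp [mtdLoop]
  | cons c cs ih =>
    by_cases hc : c = '#'
    · subst hc
      simp [mtdLoop, mtdLoop_state2, List.takeWhile, List.dropWhile]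
    · rw [show mtdLoop (c :: cs) u m 1 = mtdLoop cs (u ++ [c]) m 1 by simp [mtdLoop, hc], ih]
      rw [List.takeWhile_cons, List.dropWhile_cons]
      simp [hc]

theorem mtdLoop_state0 (cs u m : List Char) :
    mtdLoop cs u m 0 = mtdLoop ((cs.dropWhile (fun x => decide (x ≠ '&'))).drop 1) u m 1 := by
  induction cs with
  | nil => simp [mtdLoop, List.dropWhile]
  | cons c cs ih =>
    by_cases hc : c = '&'
    · subst hc
      rw [List.dropWhile_cons]
      simp [mtdLoop]
    · rw [show mtdLoop (c :: cs) u m 0 = mtdLoop cs u m 0 by simp [mtdLoop, hc], ih,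
          List.dropWhile_cons]
      simp [hc]

-- single-character find characterised by takeWhile/dropWhile
theorem infix_singleton_iff {c : Char} {cs : List Char} : [c] <:+: cs ↔ c ∈ cs := by
  constructor
  · rintro ⟨p, s, rfl⟩; simp
  · intro h
    obtain ⟨p, s, rfl⟩ := List.append_of_mem h
    exact ⟨p, s, by simp⟩

theorem find_singleton_eq_neg_one {c : Char} {cs : List Char} (h : c ∉ cs) :
    PySem.Chars.find cs [c] = -1 := by
  rw [PySem.Chars.find_eq_neg_one_iff, infix_singleton_iff]; exact h

theorem find_singleton_mem {c : Char} {cs : List Char} (h : c ∈ cs) :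
    PySem.Chars.find cs [c] = ((cs.takeWhile (fun x => decide (x ≠ c))).length : Int) := by
  set p : Char → Bool := fun x => decide (x ≠ c) with hp
  have hnn : 0 ≤ PySem.Chars.find cs [c] := by
    rw [PySem.Chars.find_nonneg_iff, infix_singleton_iff]; exact h
  obtain ⟨hpre, hmin⟩ := PySem.Chars.find_spec hnn
  set n := (cs.takeWhile p).length with hn
  have htwdw : cs.takeWhile p ++ cs.dropWhile p = cs := List.takeWhile_append_dropWhile
  have hdropn : cs.drop n = cs.dropWhile p := by
    conv_lhs => rw [← htwdw]
    exact List.drop_left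
  have hdw_ne : cs.dropWhile p ≠ [] := by
    intro hnil
    have hmem : c ∈ cs.takeWhile p := by
      rw [← htwdw, hnil, List.append_nil] at h; exact h
    have := List.mem_takeWhile_imp hmem
    simp [hp] at this
  obtain ⟨x, xs, hx⟩ := List.exists_cons_of_ne_nil hdw_ne
  have hh : (cs.dropWhile p).head hdw_ne = x := by
    have h1 := congrArg List.head? hx
    rwa [List.head?_eq_some_head hdw_ne, List.head?_cons, Option.some.injEq] at h1
  have hxc : x = c := by
    have hf := List.head_dropWhile_not p hdw_ne
    rw [hh] at hf
    simpa [hp] using hf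
  have hpre_n : [c] <+: cs.drop n := by
    rw [hdropn, hx, hxc]
    exact ⟨xs, rfl⟩
  have hmin_n : ∀ i < n, ¬ ([c] <+: cs.drop i) := by
    intro i hi hip
    have hi' : i < (cs.takeWhile p).length := hn ▸ hi
    have hlen : i < cs.length := lt_of_lt_of_le hi' (List.takeWhile_prefix p).length_le
    have hget : (cs.takeWhile p)[i] = cs[i] := (List.takeWhile_prefix p).getElem hi'
    have hpi := List.mem_takeWhile_imp (List.getElem_mem hi')
    rw [hget] at hpi
    obtain ⟨t, ht⟩ := hip
    have hci : cs[i]? = some c := by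
      rw [← List.head?_drop, ← ht]; rfl
    rw [List.getElem?_eq_getElem hlen, Option.some.injEq] at hci
    rw [hci] at hpi
    simp [hp] at hpi
  have h1 : (PySem.Chars.find cs [c]).toNat ≤ n := by
    by_contra hlt
    exact hmin _ (by omega) hpre_n
  have h2 : n ≤ (PySem.Chars.find cs [c]).toNat := by
    by_contra hlt
    exact hmin_n _ (by omega) hpre
  omega

theorem string_of_toList {l : List Char} {t : String} (h : l = t.toList) :
    String.ofList l = t := by
  rw [h, String.ofList_toList]

theorem drop_length_takeWhile (p : Char → Bool) (cs : List Char) :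
    cs.drop (cs.takeWhile p).length = cs.dropWhile p := by
  have h := List.takeWhile_append_dropWhile (p := p) (l := cs)
  calc cs.drop (cs.takeWhile p).length
      = (cs.takeWhile p ++ cs.dropWhile p).drop (cs.takeWhile p).length := by rw [h]
    _ = cs.dropWhile p := List.drop_left

-- ===== VERDICT (by name: the statement is the Claim_ definition above) =====
theorem message_to_data_spec : Claim_equal_message_to_data := by
  intro s _
  unfold Spec_message_to_data message_to_data message_to_data_alt
  rw [mtdLoop_state0, mtdLoop_state1]
  simp only [List.nil_append]
  by_cases hamp : '&' ∈ s.toList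
  · set nA : Nat := (s.toList.takeWhile (fun x => decide (x ≠ '&'))).length with hnA
    have hfind : PySem.Str.find s "&" = (nA : Int) := by
      rw [PySem.Str.find_eq, show ("&" : String).toList = ['&'] from rfl, hnA]
      exact find_singleton_mem hamp
    rw [hfind, if_neg (by omega)]
    have hrestL : (PySem.Str.slice s (some ((nA : Int) + 1)) none).toList
        = (s.toList.dropWhile (fun x => decide (x ≠ '&'))).drop 1 := by
      rw [PySem.Str.toList_slice, PySem.Chars.slice_eq_listSlice,
          show ((nA : Int) + 1) = ((nA + 1 : Nat) : Int) by push_cast; ring,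
          PySem.List.slice_from_natCast,
          ← drop_length_takeWhile (fun x => decide (x ≠ '&')) s.toList,
          List.drop_drop]
    obtain ⟨rest, hrest⟩ : ∃ r : String, PySem.Str.slice s (some ((nA : Int) + 1)) none = r :=
      ⟨_, rfl⟩
    rw [hrest] at hrestL ⊢
    rw [← hrestL]
    by_cases hhash : '#' ∈ rest.toList
    · set nB : Nat := (rest.toList.takeWhile (fun x => decide (x ≠ '#'))).length with hnB
      have hfindB : PySem.Str.find rest "#" = (nB : Int) := by
        rw [PySem.Str.find_eq, show ("#" : String).toList = ['#'] from rfl, hnB]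
        exact find_singleton_mem hhash
      rw [hfindB, if_neg (by omega)]
      have h1 : String.ofList (rest.toList.takeWhile (fun x => decide (x ≠ '#')))
          = PySem.Str.slice rest none (some (nB : Int)) := by
        apply string_of_toList
        rw [PySem.Str.toList_slice, PySem.Chars.slice_eq_listSlice,
            PySem.List.slice_to_natCast, hnB]
        exact List.prefix_iff_eq_take.mp (List.takeWhile_prefix _)
      have h2 : String.ofList ((rest.toList.dropWhile (fun x => decide (x ≠ '#'))).drop 1)
          = PySem.Str.slice rest (some ((nB : Int) + 1)) none := by
        apply string_of_toList
        rw [PySem.Str.toList_slice, PySem.Chars.slice_eq_listSlice,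
            show ((nB : Int) + 1) = ((nB + 1 : Nat) : Int) by push_cast; ring,
            PySem.List.slice_from_natCast,
            ← drop_length_takeWhile (fun x => decide (x ≠ '#')) rest.toList,
            List.drop_drop]
      rw [h1, h2]
    · have hfindB : PySem.Str.find rest "#" = -1 := by
        rw [PySem.Str.find_eq, show ("#" : String).toList = ['#'] from rfl]
        exact find_singleton_eq_neg_one hhash
      rw [hfindB, if_pos rfl]
      have hdwnil : rest.toList.dropWhile (fun x => decide (x ≠ '#')) = [] := by
        rw [List.dropWhile_eq_nil_iff]
        intro x hx
        simp only [decide_eq_true_eq]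
        rintro rfl; exact hhash hx
      have htwall : rest.toList.takeWhile (fun x => decide (x ≠ '#')) = rest.toList := by
        conv_rhs => rw [← List.takeWhile_append_dropWhile
          (p := fun x => decide (x ≠ '#')) (l := rest.toList)]
        rw [hdwnil, List.append_nil]
      rw [htwall, hdwnil, string_of_toList rfl]
      rfl
  · have hfind : PySem.Str.find s "&" = -1 := by
      rw [PySem.Str.find_eq, show ("&" : String).toList = ['&'] from rfl]
      exact find_singleton_eq_neg_one hamp
    rw [hfind, if_pos rfl]
    have hdw : s.toList.dropWhile (fun x => decide (x ≠ '&')) = [] := by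
      rw [List.dropWhile_eq_nil_iff]
      intro x hx
      simp only [decide_eq_true_eq]
      rintro rfl; exact hamp hx
    rw [hdw]
    rfl
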